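-- pv_equiv track=rewrite | github.com/azmonoam/network_structure_function | main/ergm_model/ergm_utils.py | get_allowed_connections_based_on_ff_network_dims
-- ===== SOURCE A (Python) =====
-- from typing import List, Tuple
--
-- def get_allowed_connections_based_on_ff_network_dims(
--         dimensions: List[int],
-- ) -> List[Tuple[int, int]]:
--     allowed_connections = []
--     for d in range(len(dimensions) - 1):
--         for i in range(sum(dimensions[:d]), sum(dimensions[:d]) + dimensions[d]):
--             for j in range(sum(dimensions[:d + 1]), sum(dimensions[:d + 1]) + dimensions[d + 1]):
--                 allowed_connections.append((i, j))
--     return allowed_connections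
-- ===== SOURCE B (Python) =====
-- def get_allowed_connections_based_on_ff_network_dims(dimensions):
--     # One pass with a running offset over adjacent layer pairs; no repeated prefix sums.
--     out = []
--     off = 0
--     for a, b in zip(dimensions, dimensions[1:]):
--         nxt = off + a
--         out.extend((i, j) for i in range(off, nxt) for j in range(nxt, nxt + b))
--         off = nxt
--     return out
-- ===== Notes on version B (the rewrite author's own statement) =====
-- stated objective: alternative
-- what changed: Replaces the index loop that recomputes sum(dimensions[:d]) prefix sums on every access with a single pass over zipped adjacent layer pairs carrying a running offset.
import Mathlib
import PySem

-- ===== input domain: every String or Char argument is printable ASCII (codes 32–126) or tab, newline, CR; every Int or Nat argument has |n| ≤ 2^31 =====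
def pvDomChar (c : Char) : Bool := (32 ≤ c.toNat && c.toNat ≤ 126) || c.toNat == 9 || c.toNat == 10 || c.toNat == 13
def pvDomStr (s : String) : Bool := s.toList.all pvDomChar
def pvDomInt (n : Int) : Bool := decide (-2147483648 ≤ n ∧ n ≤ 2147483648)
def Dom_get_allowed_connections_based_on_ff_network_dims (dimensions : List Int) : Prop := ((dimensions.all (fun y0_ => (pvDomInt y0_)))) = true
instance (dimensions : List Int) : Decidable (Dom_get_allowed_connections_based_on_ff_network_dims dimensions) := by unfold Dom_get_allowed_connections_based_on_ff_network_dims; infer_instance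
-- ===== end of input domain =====

-- B replaces A's repeated sum(dimensions[:d]) prefix-sum scans by a single pass over
-- adjacent layer pairs with a running offset (objective: alternative decomposition).

-- ===== PORT A =====
def get_allowed_connections_based_on_ff_network_dims (dimensions : List Int) : List (Int × Int) :=
  (PySem.List.pyRange 0 ((dimensions.length : Int) - 1) 1).foldl
    (fun acc d =>
      (PySem.List.pyRange (PySem.List.slice dimensions none (some d)).sum
          ((PySem.List.slice dimensions none (some d)).sum + PySem.List.pyGetD dimensions d 0) 1).foldl
        (fun acc2 i =>
          (PySem.List.pyRange (PySem.List.slice dimensions none (some (d + 1))).sum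
              ((PySem.List.slice dimensions none (some (d + 1))).sum + PySem.List.pyGetD dimensions (d + 1) 0) 1).foldl
            (fun acc3 j => acc3 ++ [(i, j)]) acc2)
        acc)
    []

-- ===== PORT B =====
def get_allowed_connections_based_on_ff_network_dims_alt (dimensions : List Int) : List (Int × Int) :=
  ((dimensions.zip (PySem.List.slice dimensions (some 1) none)).foldl
    (fun (st : List (Int × Int) × Int) ab =>
      let nxt := st.2 + ab.1
      (st.1 ++ (PySem.List.pyRange st.2 nxt 1).flatMap
         (fun i => (PySem.List.pyRange nxt (nxt + ab.2) 1).map (fun j => (i, j))),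
       nxt))
    ([], 0)).1

-- ===== PRECONDITION & SPEC =====
def Spec_get_allowed_connections_based_on_ff_network_dims (dimensions : List Int) (out : List (Int × Int)) : Prop := out = get_allowed_connections_based_on_ff_network_dims_alt dimensions
instance (dimensions : List Int) (out : List (Int × Int)) : Decidable (Spec_get_allowed_connections_based_on_ff_network_dims dimensions out) := by unfold Spec_get_allowed_connections_based_on_ff_network_dims; infer_instance

-- ===== CLAIM (what is proved, stated in full; the proofs are below) =====
def Claim_equal_get_allowed_connections_based_on_ff_network_dims : Prop := ∀ (dimensions : List Int), Dom_get_allowed_connections_based_on_ff_network_dims dimensions → Spec_get_allowed_connections_based_on_ff_network_dims dimensions (get_allowed_connections_based_on_ff_network_dims dimensions)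

-- ===== LEMMAS AND PROOFS =====

-- one inter-layer block of pairs, given the start offset and the two layer widths
def pvBlock (off a b : Int) : List (Int × Int) :=
  (PySem.List.pyRange off (off + a) 1).flatMap
    (fun i => (PySem.List.pyRange (off + a) (off + a + b) 1).map (fun j => (i, j)))

-- the canonical result: walk the adjacent pairs with a running offset
def pvCore (off : Int) : List (Int × Int) → List (Int × Int)
  | [] => []
  | (a, b) :: t => pvBlock off a b ++ pvCore (off + a) t

theorem pvB_foldl (pairs : List (Int × Int)) (out : List (Int × Int)) (off : Int) :
    (pairs.foldl
      (fun (st : List (Int × Int) × Int) ab =>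
        let nxt := st.2 + ab.1
        (st.1 ++ (PySem.List.pyRange st.2 nxt 1).flatMap
           (fun i => (PySem.List.pyRange nxt (nxt + ab.2) 1).map (fun j => (i, j))),
         nxt))
      (out, off)).1 = out ++ pvCore off pairs := by
  induction pairs generalizing out off with
  | nil => simp [pvCore]
  | cons ab t ih =>
    obtain ⟨a, b⟩ := ab
    simp only [List.foldl_cons, pvCore]
    rw [ih]
    simp [pvBlock, List.append_assoc]

theorem pvTake_sum_succ (l : List Int) (k : Nat) (hk : k < l.length) :
    (l.take (k + 1)).sum = (l.take k).sum + l.getD k 0 := by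
  rw [List.sum_take_succ _ _ hk]
  simp [List.getD_eq_getElem?_getD, List.getElem?_eq_getElem hk]

theorem pvKey (dims : List Int) (off : Int) :
    (List.range (dims.length - 1)).flatMap
      (fun k => pvBlock (off + (dims.take k).sum) (dims.getD k 0) (dims.getD (k + 1) 0))
    = pvCore off (dims.zip dims.tail) := by
  induction dims generalizing off with
  | nil => simp [pvCore]
  | cons a t ih =>
    cases t with
    | nil => simp [pvCore]
    | cons b t' =>
      simp only [List.length_cons, Nat.add_sub_cancel, List.range_succ_eq_map,
        List.flatMap_cons, List.flatMap_map, List.tail_cons, List.zip_cons_cons, pvCore]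
      congr 1
      · simp
      · have hih := ih (off + a)
        simp only [List.tail_cons, List.length_cons, Nat.add_sub_cancel] at hih
        rw [← hih]
        refine List.flatMap_congr (fun k _ => ?_)
        simp only [Nat.succ_eq_add_one, List.take_succ_cons, List.getD_cons_succ]
        simp [List.sum_cons, ← add_assoc]

theorem pvA_eq_core (dims : List Int) :
    get_allowed_connections_based_on_ff_network_dims dims = pvCore 0 (dims.zip dims.tail) := by
  unfold get_allowed_connections_based_on_ff_network_dims
  simp only [PySem.List.foldl_append_singleton_eq_map, PySem.List.foldl_append_eq_flatMap]
  rw [PySem.List.pyRange_one]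
  have hlen : ((dims.length : Int) - 1 - 0).toNat = dims.length - 1 := by omega
  rw [hlen, List.flatMap_map, ← pvKey dims 0]
  refine List.flatMap_congr (fun k hk => ?_)
  have hk1 : ((k : Int) + 1) = ((k + 1 : Nat) : Int) := by push_cast; ring
  simp only [zero_add]
  rw [hk1]
  have hk' : k < dims.length := by
    simp only [List.mem_range] at hk; omega
  simp only [PySem.List.slice_to_natCast, PySem.List.pyGetD_natCast, pvBlock,
    pvTake_sum_succ dims k hk', add_assoc]

theorem pvB_eq_core (dims : List Int) :
    get_allowed_connections_based_on_ff_network_dims_alt dims = pvCore 0 (dims.zip dims.tail) := by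
  unfold get_allowed_connections_based_on_ff_network_dims_alt
  rw [PySem.List.slice_from_one, pvB_foldl]
  simp

-- ===== VERDICT (by name: the statement is the Claim_ definition above) =====
theorem get_allowed_connections_based_on_ff_network_dims_spec : Claim_equal_get_allowed_connections_based_on_ff_network_dims := by
  intro dims _
  unfold Spec_get_allowed_connections_based_on_ff_network_dims
  rw [pvA_eq_core, pvB_eq_core]
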